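-- pv_equiv track=rewrite | github.com/Proxima7/GrandPa | src/grandpa/utils/bounding_box.py | flip_bbox
-- ===== SOURCE A (Python) =====
-- def flip_bbox(bbox, img_shape, direction):
--     """
--     Flips a 4 point bounding box in a given direction
--     Args:
--         bbox: source bounding box
--         img_shape: shape of the associated image
--         direction: left to right as leftright, top to bottom as topbottom, both as both
--
--     Returns: flipped bounding box
--
--     """
--     h, w = img_shape[:2]
--     center_x, center_y = int(w/2), int(h/2)
--     if direction == "leftright":
--         for i in range(len(bbox)):
--             bbox[i][0] -= 2 * (bbox[i][0] - center_x)
--     elif direction == "topbottom":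
--         for i in range(len(bbox)):
--             bbox[i][1] -= 2 * (bbox[i][1] - center_y)
--     elif direction == "both":
--         bbox = flip_bbox(bbox, img_shape, "leftright")
--         bbox = flip_bbox(bbox, img_shape, "topbottom")
--     else:
--         raise ValueError("Direction is not supported.")
--
--     return bbox
-- ===== SOURCE B (Python) =====
-- def flip_bbox(bbox, img_shape, direction):
--     h, w = img_shape[:2]
--     moves = {"leftright": [(0, int(w / 2))],
--              "topbottom": [(1, int(h / 2))],
--              "both": [(0, int(w / 2)), (1, int(h / 2))]}
--     if direction not in moves:
--         raise ValueError("Direction is not supported.")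
--     pairs = moves[direction]
--     for row in bbox:
--         for idx, c in pairs:
--             row[idx] -= 2 * (row[idx] - c)
--     return bbox
-- ===== Notes on version B (the rewrite author's own statement) =====
-- stated objective: simpler
-- what changed: Replaced the per-direction branch loops and the recursive 'both' case by a table mapping the direction to (axis, center) pairs applied in one flat pass over the rows.
import Mathlib
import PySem

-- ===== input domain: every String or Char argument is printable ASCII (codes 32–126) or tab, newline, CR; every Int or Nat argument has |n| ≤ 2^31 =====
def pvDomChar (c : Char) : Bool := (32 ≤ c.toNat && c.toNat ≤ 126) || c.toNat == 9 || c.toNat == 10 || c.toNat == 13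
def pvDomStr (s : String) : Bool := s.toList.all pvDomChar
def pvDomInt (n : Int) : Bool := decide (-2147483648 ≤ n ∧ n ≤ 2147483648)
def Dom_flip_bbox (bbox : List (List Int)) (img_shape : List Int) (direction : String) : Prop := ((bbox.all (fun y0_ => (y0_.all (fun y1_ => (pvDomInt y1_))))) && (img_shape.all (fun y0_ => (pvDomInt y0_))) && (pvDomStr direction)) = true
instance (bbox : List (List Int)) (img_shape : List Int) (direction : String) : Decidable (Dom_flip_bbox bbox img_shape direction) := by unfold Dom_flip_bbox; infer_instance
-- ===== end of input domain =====

-- B replaces the per-direction loops and the recursive "both" case of A by a direction → (axis, center) table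
-- applied in one flat pass over the rows (objective: simpler). Both A and B mutate bbox in place in Python;
-- the equivalence proved here is about the returned value (B performs the same mutation).


-- ===== PORT A =====
-- Python's int(w/2) truncates toward zero: exact as Int.tdiv on the |n| ≤ 2^31 domain.
-- The in-place loop `bbox[i][axis] -= 2*(bbox[i][axis]-c)` is ported as a map producing the returned list.
-- On inputs where Python raises (short img_shape, short row, unknown direction) the port returns a
-- default/unchanged value; those inputs are excluded by Pre_flip_bbox.
def flip_bbox (bbox : List (List Int)) (img_shape : List Int) (direction : String) : List (List Int) :=
  let h := img_shape.getD 0 0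
  let w := img_shape.getD 1 0
  let center_x := Int.tdiv w 2
  let center_y := Int.tdiv h 2
  if direction = "leftright" then
    bbox.map (fun r => r.set 0 (r.getD 0 0 - 2 * (r.getD 0 0 - center_x)))
  else if direction = "topbottom" then
    bbox.map (fun r => r.set 1 (r.getD 1 0 - 2 * (r.getD 1 0 - center_y)))
  else if direction = "both" then
    flip_bbox (flip_bbox bbox img_shape "leftright") img_shape "topbottom"
  else
    bbox  -- Python: raise ValueError("Direction is not supported."); excluded by Pre_
termination_by (if direction = "both" then 1 else 0)
decreasing_by all_goals simp_all

-- ===== PORT B =====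
def flip_bbox_alt (bbox : List (List Int)) (img_shape : List Int) (direction : String) : List (List Int) :=
  let h := img_shape.getD 0 0
  let w := img_shape.getD 1 0
  let moves : Option (List (Nat × Int)) :=
    if direction = "leftright" then some [(0, Int.tdiv w 2)]
    else if direction = "topbottom" then some [(1, Int.tdiv h 2)]
    else if direction = "both" then some [(0, Int.tdiv w 2), (1, Int.tdiv h 2)]
    else none
  match moves with
  | none => bbox  -- Python: raise ValueError("Direction is not supported."); excluded by Pre_
  | some pairs =>
    bbox.map (fun row =>
      pairs.foldl (fun row p => row.set p.1 (row.getD p.1 0 - 2 * (row.getD p.1 0 - p.2))) row)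

-- ===== PRECONDITION & SPEC =====
-- Pre_ excludes exactly the inputs where the Python A raises: img_shape shorter than 2 (unpack ValueError),
-- an unsupported direction (ValueError), and rows too short for the flipped axis (IndexError).
def Pre_flip_bbox (bbox : List (List Int)) (img_shape : List Int) (direction : String) : Prop :=
  2 ≤ img_shape.length ∧
  ((direction = "leftright" ∧ ∀ r ∈ bbox, 1 ≤ r.length) ∨
   ((direction = "topbottom" ∨ direction = "both") ∧ ∀ r ∈ bbox, 2 ≤ r.length))
instance (bbox : List (List Int)) (img_shape : List Int) (direction : String) : Decidable (Pre_flip_bbox bbox img_shape direction) := by unfold Pre_flip_bbox; infer_instance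

def pvWitness_flip_bbox : List (List Int) × List Int × String := ([[1, 2], [3, 4]], [10, 12], "both")

def Spec_flip_bbox (bbox : List (List Int)) (img_shape : List Int) (direction : String) (out : List (List Int)) : Prop := out = flip_bbox_alt bbox img_shape direction
instance (bbox : List (List Int)) (img_shape : List Int) (direction : String) (out : List (List Int)) : Decidable (Spec_flip_bbox bbox img_shape direction out) := by unfold Spec_flip_bbox; infer_instance

-- ===== CLAIM (what is proved, stated in full; the proofs are below) =====
def Claim_equal_flip_bbox : Prop := ∀ (bbox : List (List Int)) (img_shape : List Int) (direction : String), Dom_flip_bbox bbox img_shape direction → Pre_flip_bbox bbox img_shape direction → Spec_flip_bbox bbox img_shape direction (flip_bbox bbox img_shape direction)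

-- ===== LEMMAS AND PROOFS =====

-- ===== VERDICT (by name: the statement is the Claim_ definition above) =====
theorem flip_bbox_spec : Claim_equal_flip_bbox := by
  intro bbox img_shape direction _ _
  unfold Spec_flip_bbox flip_bbox flip_bbox_alt
  by_cases h1 : direction = "leftright"
  · simp [h1]
  · by_cases h2 : direction = "topbottom"
    · simp [h2]
    · by_cases h3 : direction = "both"
      · simp [h3, flip_bbox, List.map_map, List.foldl, Function.comp]
      · simp [h1, h2, h3]
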